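-- pv_equiv track=rewrite | github.com/YvonMartin/Minimiseur-logique-V1.0 | solveboolV10.py | acqui_terme
-- ===== SOURCE A (Python) =====
-- def acqui_terme(chaine01, size):
--     """
--     Transforms into tuple (term, mask) an entry of type for example '01-10-' -> (20, 9)
--     """
--     erreur = False
--     nbr= len(chaine01)
--     terme, msq = 0, 0
--     msq = 0
--     if size != nbr:
--         erreur = True
--         return (terme, msq), erreur
--     pt = 1 << size
--     for i in chaine01:
--         pt >>= 1
--         if i == "1":
--             terme += pt
--         elif i == "-":
--             msq += pt
--         elif i != "0":
--             erreur = True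
--             terme, msq = 0, 0
--             break
--     return (terme, msq), erreur
-- ===== SOURCE B (Python) =====
-- def acqui_terme(chaine01, size):
--     if size != len(chaine01):
--         return (0, 0), True
--     if any(c not in "01-" for c in chaine01):
--         return (0, 0), True
--     s1 = ''.join('1' if c == '1' else '0' for c in chaine01)
--     s2 = ''.join('1' if c == '-' else '0' for c in chaine01)
--     terme = int(s1, 2) if s1 else 0
--     msq = int(s2, 2) if s2 else 0
--     return (terme, msq), False
-- ===== Notes on version B (the rewrite author's own statement) =====
-- stated objective: idiomatic
-- what changed: B validates the whole string first, then parses the term and mask as base-2 numbers built by joins (int(s,2)), instead of A's single loop accumulating shifted power-of-two weights with an in-loop error break.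
import Mathlib
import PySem

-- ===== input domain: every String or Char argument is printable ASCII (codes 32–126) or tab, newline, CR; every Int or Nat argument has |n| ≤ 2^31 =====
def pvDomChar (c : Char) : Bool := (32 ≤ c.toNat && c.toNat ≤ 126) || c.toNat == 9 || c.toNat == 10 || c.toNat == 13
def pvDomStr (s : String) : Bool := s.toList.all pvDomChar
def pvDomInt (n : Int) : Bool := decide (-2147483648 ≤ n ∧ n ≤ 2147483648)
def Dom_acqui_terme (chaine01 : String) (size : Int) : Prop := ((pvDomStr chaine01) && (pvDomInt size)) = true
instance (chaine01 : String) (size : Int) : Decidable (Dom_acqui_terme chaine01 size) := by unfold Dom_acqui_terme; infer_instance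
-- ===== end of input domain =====

-- B parses the term and mask as base-2 numbers of derived bit-strings after a single upfront
-- validity scan, instead of A's one loop accumulating shifted power-of-two weights (idiomatic).


-- ===== PORT A =====
-- the for-loop of A over the characters, state (terme, msq, pt); the invalid-char branch breaks
def pvLoopA : List Char → Int → Int → Int → (Int × Int) × Bool
  | [], terme, msq, _ => ((terme, msq), false)
  | c :: rest, terme, msq, pt =>
    let pt' := Int.fdiv pt 2                  -- pt >>= 1 (Python shift floors; exact)
    if c == '1' then pvLoopA rest (terme + pt') msq pt'
    else if c == '-' then pvLoopA rest terme (msq + pt') pt'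
    else if c != '0' then ((0, 0), true)      -- erreur = True; terme, msq = 0, 0; break
    else pvLoopA rest terme msq pt'

def acqui_terme (chaine01 : String) (size : Int) : (Int × Int) × Bool :=
  let nbr : Int := chaine01.toList.length
  if size ≠ nbr then ((0, 0), true)
  else pvLoopA chaine01.toList 0 0 (2 ^ size.toNat)  -- pt = 1 << size; here size = nbr ≥ 0, so toNat is exact

-- ===== PORT B =====
def pvBit1 (c : Char) : Int := if c == '1' then 1 else 0   -- '1' if c=='1' else '0', as a bit
def pvBitD (c : Char) : Int := if c == '-' then 1 else 0   -- '1' if c=='-' else '0', as a bit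

def acqui_terme_alt (chaine01 : String) (size : Int) : (Int × Int) × Bool :=
  if size ≠ (chaine01.toList.length : Int) then ((0, 0), true)
  else if chaine01.toList.any (fun c => !(c == '0' || c == '1' || c == '-')) then ((0, 0), true)
  else
    -- int(s, 2) over the joined bit-string; on the empty string the fold is 0, matching B's guard
    let terme := chaine01.toList.foldl (fun acc c => 2 * acc + pvBit1 c) 0
    let msq := chaine01.toList.foldl (fun acc c => 2 * acc + pvBitD c) 0
    ((terme, msq), false)

-- ===== PRECONDITION & SPEC =====
def Spec_acqui_terme (chaine01 : String) (size : Int) (out : (Int × Int) × Bool) : Prop := out = acqui_terme_alt chaine01 size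
instance (chaine01 : String) (size : Int) (out : (Int × Int) × Bool) : Decidable (Spec_acqui_terme chaine01 size out) := by unfold Spec_acqui_terme; infer_instance

-- ===== CLAIM (what is proved, stated in full; the proofs are below) =====
def Claim_equal_acqui_terme : Prop := ∀ (chaine01 : String) (size : Int), Dom_acqui_terme chaine01 size → Spec_acqui_terme chaine01 size (acqui_terme chaine01 size)

-- ===== LEMMAS AND PROOFS =====

-- base-2 horner fold: starting accumulator shifts out by 2^length
theorem foldl_bin_shift (g : Char → Int) (l : List Char) (a : Int) :
    l.foldl (fun acc c => 2 * acc + g c) a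
      = a * 2 ^ l.length + l.foldl (fun acc c => 2 * acc + g c) 0 := by
  induction l generalizing a with
  | nil => simp
  | cons c rest ih =>
    simp only [List.foldl_cons, List.length_cons]
    rw [ih (2 * a + g c), ih (2 * 0 + g c), pow_succ]
    ring

theorem pvLoopA_valid (l : List Char) (t m : Int)
    (h : ∀ c ∈ l, c = '0' ∨ c = '1' ∨ c = '-') :
    pvLoopA l t m (2 ^ l.length)
      = ((t + l.foldl (fun acc c => 2 * acc + pvBit1 c) 0,
          m + l.foldl (fun acc c => 2 * acc + pvBitD c) 0), false) := by
  induction l generalizing t m with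
  | nil => simp [pvLoopA]
  | cons c rest ih =>
    have hfd : Int.fdiv ((2 : Int) ^ (rest.length + 1)) 2 = 2 ^ rest.length := by
      rw [pow_succ, Int.mul_fdiv_cancel _ (by norm_num)]
    have hrest : ∀ d ∈ rest, d = '0' ∨ d = '1' ∨ d = '-' :=
      fun d hd => h d (List.mem_cons_of_mem _ hd)
    rcases h c List.mem_cons_self with rfl | rfl | rfl
    · have hstep : pvLoopA ('0' :: rest) t m (2 ^ ('0' :: rest).length)
          = pvLoopA rest t m (2 ^ rest.length) := by
        simp [pvLoopA]
        rw [hfd]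
      rw [hstep, ih _ _ hrest]
      simp [pvBit1, pvBitD]
    · have hstep : pvLoopA ('1' :: rest) t m (2 ^ ('1' :: rest).length)
          = pvLoopA rest (t + 2 ^ rest.length) m (2 ^ rest.length) := by
        simp [pvLoopA]
        rw [hfd]
      rw [hstep, ih _ _ hrest]
      simp only [List.foldl_cons, Prod.mk.injEq]
      refine ⟨⟨?_, ?_⟩, trivial⟩
      · rw [foldl_bin_shift pvBit1 rest (2 * 0 + pvBit1 '1')]
        have : pvBit1 '1' = 1 := rfl
        rw [this]; ring
      · have : pvBitD '1' = 0 := rfl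
        rw [this]; norm_num
    · have hstep : pvLoopA ('-' :: rest) t m (2 ^ ('-' :: rest).length)
          = pvLoopA rest t (m + 2 ^ rest.length) (2 ^ rest.length) := by
        simp [pvLoopA]
        rw [hfd]
      rw [hstep, ih _ _ hrest]
      simp only [List.foldl_cons, Prod.mk.injEq]
      refine ⟨⟨?_, ?_⟩, trivial⟩
      · have : pvBit1 '-' = 0 := rfl
        rw [this]; norm_num
      · rw [foldl_bin_shift pvBitD rest (2 * 0 + pvBitD '-')]
        have : pvBitD '-' = 1 := rfl
        rw [this]; ring

theorem pvLoopA_invalid (l : List Char) (t m pt : Int)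
    (h : ∃ c ∈ l, ¬(c = '0' ∨ c = '1' ∨ c = '-')) :
    pvLoopA l t m pt = ((0, 0), true) := by
  induction l generalizing t m pt with
  | nil => simp at h
  | cons c rest ih =>
    by_cases hc : c = '0' ∨ c = '1' ∨ c = '-'
    · have hrest : ∃ d ∈ rest, ¬(d = '0' ∨ d = '1' ∨ d = '-') := by
        obtain ⟨d, hd, hbad⟩ := h
        rcases List.mem_cons.1 hd with rfl | hd'
        · exact absurd hc hbad
        · exact ⟨d, hd', hbad⟩
      rcases hc with rfl | rfl | rfl <;> simp only [pvLoopA] <;> norm_num <;>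
        exact ih _ _ _ hrest
    · push_neg at hc
      obtain ⟨h0, h1, hd⟩ := hc
      simp [pvLoopA, h0, h1, hd]

-- ===== VERDICT (by name: the statement is the Claim_ definition above) =====
theorem acqui_terme_spec : Claim_equal_acqui_terme := by
  intro chaine01 size _
  unfold Spec_acqui_terme acqui_terme acqui_terme_alt
  by_cases hsz : size = (chaine01.toList.length : Int)
  · rw [if_neg (not_not_intro hsz), if_neg (not_not_intro hsz)]
    have hnat : size.toNat = chaine01.toList.length := by
      rw [hsz]; simp
    rw [hnat]
    by_cases hv : ∀ c ∈ chaine01.toList, c = '0' ∨ c = '1' ∨ c = '-'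
    · have hany : chaine01.toList.any (fun c => !(c == '0' || c == '1' || c == '-')) = false := by
        simp only [List.any_eq_false]
        intro c hc
        rcases hv c hc with rfl | rfl | rfl <;> simp
      rw [pvLoopA_valid _ _ _ hv, if_neg (ne_of_eq_of_ne hany Bool.false_ne_true)]
      simp
    · push_neg at hv
      have hv' : ∃ c ∈ chaine01.toList, ¬(c = '0' ∨ c = '1' ∨ c = '-') := by
        obtain ⟨c, hc, h0, h1, hd⟩ := hv
        exact ⟨c, hc, by simp [h0, h1, hd]⟩
      have hany : chaine01.toList.any (fun c => !(c == '0' || c == '1' || c == '-')) = true := by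
        obtain ⟨c, hc, h0, h1, hd⟩ := hv
        exact List.any_eq_true.2 ⟨c, hc, by simp [h0, h1, hd]⟩
      rw [pvLoopA_invalid _ _ _ _ hv', if_pos hany]
  · rw [if_pos hsz, if_pos hsz]
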